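-- pv_equiv track=rewrite | github.com/eric-deau/COMP2121_A3 | comp2121_assignment_3.py | fourBitPalindrome
-- ===== SOURCE A (Python) =====
-- def fourBitPalindrome(bitNum):
--     count = 0
--     current_state = 'start'
--     states = {
--         'start': {'0': 's0', '1': 's1'},
--         's0': {'0': 's00', '1': 's01'},
--         's1': {'0': 's10', '1': 's11'},
--         's10': {'0': 's100', '1': 's01'},
--         's00': {'0': 's000', '1': 's10'},
--         's01': {'0': 's10', '1': 's011'},
--         's11': {'0': 's10', '1': 's111'},
--         's011': {'0': 's0110', '1': 's111'},
--         's100': {'0': 's000', '1': 's1001'},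
--         's111': {'0': 's10', '1': 's1111'},
--         's000': {'0': 's0000', '1': 's01'},
--         's0000': {'0': 's0000', '1': 's01'},
--         's1111': {'0': 's10', '1': 's1111'},
--         's1001': {'0': 's10', '1': 's011'},
--         's0110': {'0': 's100', '1': 's01'}
--     }
--     accepting_states = {'s0110', 's0000', 's1001', 's1111'}
--
--     for char in bitNum:
--         if char != '0' and char != '1':
--             continue
--         if current_state in states and char in states[current_state]:
--             current_state = states[current_state][char]
--             if current_state in accepting_states:
--                 count += 1
--
--     return count
-- ===== SOURCE B (Python) =====
-- def fourBitPalindrome(bitNum):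
--     bits = [c for c in bitNum if c == '0' or c == '1']
--     count = 0
--     for w0, w1, w2, w3 in zip(bits, bits[1:], bits[2:], bits[3:]):
--         if w0 == w3 and w1 == w2:
--             count += 1
--     return count
-- ===== Notes on version B (the rewrite author's own statement) =====
-- stated objective: simpler
-- what changed: Replaces the hand-written 15-state transition-table automaton with a direct sliding-window scan that counts 4-bit palindrome windows over the filtered bit sequence.
-- intended difference: On inputs whose '0'/'1' characters begin with "001" and continue far enough (filtered length >= 6, or exactly 5 with 4th bit != 5th bit), A's mistyped transition s00--'1'-->s10 forgets the leading 0 and miscounts the windows ending at bit positions 5 and 6 (e.g. A returns 1 on '00101', which contains no 4-bit palindrome window); B returns the true number of 4-bit palindrome windows, which is the function's stated purpose. — e.g. on fourBitPalindrome("00101"): A returns 1, B returns 0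
import Mathlib
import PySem

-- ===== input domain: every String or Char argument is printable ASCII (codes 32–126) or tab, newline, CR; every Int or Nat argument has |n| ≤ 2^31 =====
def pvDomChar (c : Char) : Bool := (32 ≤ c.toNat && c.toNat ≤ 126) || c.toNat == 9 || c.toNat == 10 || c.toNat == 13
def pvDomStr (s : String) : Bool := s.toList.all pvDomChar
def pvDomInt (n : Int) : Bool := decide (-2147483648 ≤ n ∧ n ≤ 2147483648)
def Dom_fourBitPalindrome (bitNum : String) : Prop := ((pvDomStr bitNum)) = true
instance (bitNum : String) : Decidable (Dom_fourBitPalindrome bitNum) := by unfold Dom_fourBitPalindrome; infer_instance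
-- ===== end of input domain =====

-- B replaces A's hand-written 15-state transition-table automaton by a direct sliding-window
-- scan counting 4-bit palindrome windows (objective: simpler); on inputs whose bits start "001"
-- (see D_ below) A's mistyped transition table miscounts and B returns the intended count.

-- ===== PORT A =====
-- the 'states' dict literal of A
def pvStatesA : PySem.Dict String (PySem.Dict Char String) :=
  PySem.Dict.ofList [
    ("start", PySem.Dict.ofList [('0', "s0"),   ('1', "s1")]),
    ("s0",    PySem.Dict.ofList [('0', "s00"),  ('1', "s01")]),
    ("s1",    PySem.Dict.ofList [('0', "s10"),  ('1', "s11")]),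
    ("s10",   PySem.Dict.ofList [('0', "s100"), ('1', "s01")]),
    ("s00",   PySem.Dict.ofList [('0', "s000"), ('1', "s10")]),
    ("s01",   PySem.Dict.ofList [('0', "s10"),  ('1', "s011")]),
    ("s11",   PySem.Dict.ofList [('0', "s10"),  ('1', "s111")]),
    ("s011",  PySem.Dict.ofList [('0', "s0110"),('1', "s111")]),
    ("s100",  PySem.Dict.ofList [('0', "s000"), ('1', "s1001")]),
    ("s111",  PySem.Dict.ofList [('0', "s10"),  ('1', "s1111")]),
    ("s000",  PySem.Dict.ofList [('0', "s0000"),('1', "s01")]),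
    ("s0000", PySem.Dict.ofList [('0', "s0000"),('1', "s01")]),
    ("s1111", PySem.Dict.ofList [('0', "s10"),  ('1', "s1111")]),
    ("s1001", PySem.Dict.ofList [('0', "s10"),  ('1', "s011")]),
    ("s0110", PySem.Dict.ofList [('0', "s100"), ('1', "s01")])]

-- the 'accepting_states' set literal of A
def pvAcceptingA : PySem.Set String := PySem.Set.ofList ["s0110", "s0000", "s1001", "s1111"]

-- the body of A's for-loop over (count, current_state)
def pvStepA (p : Int × String) (char : Char) : Int × String :=
  if char ≠ '0' ∧ char ≠ '1' then p
  else if pvStatesA.contains p.2 && (pvStatesA.getD p.2 PySem.Dict.empty).contains char then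
    let ns := (pvStatesA.getD p.2 PySem.Dict.empty).getD char p.2
    (p.1 + (if pvAcceptingA.contains ns then 1 else 0), ns)
  else p

def fourBitPalindrome (bitNum : String) : Int :=
  (bitNum.toList.foldl pvStepA ((0 : Int), "start")).1

-- ===== PORT B =====
def fourBitPalindrome_alt (bitNum : String) : Int :=
  let bits := bitNum.toList.filter (fun c => c == '0' || c == '1')
  -- zip(bits, bits[1:], bits[2:], bits[3:])
  let ws := (bits.zip (bits.drop 1)).zip ((bits.drop 2).zip (bits.drop 3))
  ws.foldl (fun count w => if w.1.1 == w.2.2 && w.1.2 == w.2.1 then count + 1 else count) (0 : Int)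

-- ===== PRECONDITION & SPEC =====
-- On inputs whose '0'/'1' characters begin with "001" and continue far enough (filtered length ≥ 6,
-- or exactly 5 with 4th bit ≠ 5th bit), A's mistyped transition s00--'1'-->s10 forgets the leading 0
-- and miscounts the windows ending at bit positions 5 and 6 (e.g. A returns 1 on "00101", which has
-- no 4-bit palindrome window); B returns the true number of 4-bit palindrome windows, the function's
-- stated purpose.
def D_fourBitPalindrome (bitNum : String) : Prop :=
  let f := bitNum.toList.filter (fun c => c == '0' || c == '1')
  f.take 3 = ['0', '0', '1'] ∧ (6 ≤ f.length ∨ (f.length = 5 ∧ f[3]? ≠ f[4]?))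
instance (bitNum : String) : Decidable (D_fourBitPalindrome bitNum) := by
  unfold D_fourBitPalindrome; infer_instance

def Spec_fourBitPalindrome (bitNum : String) (out : Int) : Prop :=
  ¬ D_fourBitPalindrome bitNum → out = fourBitPalindrome_alt bitNum
instance (bitNum : String) (out : Int) : Decidable (Spec_fourBitPalindrome bitNum out) := by
  unfold Spec_fourBitPalindrome; infer_instance

def pvDiffWitness_fourBitPalindrome : String := "00101"
def pvDiffWitnessOut_fourBitPalindrome : Int × Int := (1, 0)

-- ===== CLAIM (what is proved, stated in full; the proofs are below) =====
def Claim_unchanged_fourBitPalindrome : Prop := ∀ (bitNum : String), Dom_fourBitPalindrome bitNum → Spec_fourBitPalindrome bitNum (fourBitPalindrome bitNum)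
def Claim_changed_fourBitPalindrome : Prop := Dom_fourBitPalindrome (pvDiffWitness_fourBitPalindrome) ∧ D_fourBitPalindrome (pvDiffWitness_fourBitPalindrome) ∧ fourBitPalindrome (pvDiffWitness_fourBitPalindrome) = pvDiffWitnessOut_fourBitPalindrome.1 ∧ fourBitPalindrome_alt (pvDiffWitness_fourBitPalindrome) = pvDiffWitnessOut_fourBitPalindrome.2 ∧ pvDiffWitnessOut_fourBitPalindrome.1 ≠ pvDiffWitnessOut_fourBitPalindrome.2
def Claim_exact_fourBitPalindrome : Prop := ∀ (bitNum : String), Dom_fourBitPalindrome bitNum → D_fourBitPalindrome bitNum → fourBitPalindrome bitNum ≠ fourBitPalindrome_alt bitNum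

-- ===== LEMMAS AND PROOFS =====

-- abstract transition function of A's automaton
def pvδ (st : String) (c : Char) : String :=
  ((pvStatesA.get? st).bind fun row => row.get? c).getD st

def pvAcc (st : String) : Bool := pvAcceptingA.contains st

-- the 15 state names
def pvNames : List String :=
  ["start", "s0", "s1", "s10", "s00", "s01", "s11", "s011", "s100", "s111",
   "s000", "s0000", "s1111", "s1001", "s0110"]

-- count of accepting steps of the automaton run from st
def pvCnt (st : String) : List Char → Int
  | [] => 0
  | c :: r => (if pvAcc (pvδ st c) then 1 else 0) + pvCnt (pvδ st c) r

-- last-4-window palindrome test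
def pvPal4 (l : List Char) : Bool :=
  match l.drop (l.length - 4) with
  | [a, b, c, d] => a == d && b == c
  | _ => false

-- structural sliding windows
def pvWin4 : List Char → List ((Char × Char) × (Char × Char))
  | [] => []
  | a :: rest =>
    match rest with
    | b :: c :: d :: _ => ((a, b), (c, d)) :: pvWin4 rest
    | _ => []

def pvInc (w : (Char × Char) × (Char × Char)) : Int :=
  if w.1.1 == w.2.2 && w.1.2 == w.2.1 then 1 else 0

def pvSB (l : List Char) : Int := ((pvWin4 l).map pvInc).sum

def pvIsBit (c : Char) : Bool := c == '0' || c == '1'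

-- the prefixes at which A's buggy table misjudges acceptance
def pvBad (p : List Char) : Bool :=
  p.take 3 == ['0', '0', '1'] &&
    ((p.length == 5 && p[3]? != p[4]?) || (p.length == 6 && p[3]? == p[4]?))

-- all bit lists of length n
def pvBitLists : Nat → List (List Char)
  | 0 => [[]]
  | n + 1 => (pvBitLists n).flatMap fun t => ['0' :: t, '1' :: t]

def pvAll7 : List (List Char) := (List.range 8).flatMap pvBitLists

def pvRunA (l : List Char) : String := l.foldl pvδ "start"

set_option maxRecDepth 10000 in
theorem pvF1 : ∀ p ∈ pvBitLists 8, pvRunA p = pvRunA p.tail := by decide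
set_option maxRecDepth 10000 in
theorem pvF2 : ∀ p ∈ pvAll7, pvBad p = false → pvAcc (pvRunA p) = pvPal4 p := by decide
set_option maxRecDepth 10000 in
theorem pvF3 : ∀ p ∈ pvAll7, pvBad p = true → pvAcc (pvRunA p) = !(pvPal4 p) := by decide
set_option maxRecDepth 10000 in
theorem pvF4 : ∀ w ∈ pvBitLists 7, pvAcc (pvRunA w) = pvPal4 w := by decide

-- chunk 2
theorem pv_mem_bitLists : ∀ l : List Char, (∀ c ∈ l, pvIsBit c = true) → l ∈ pvBitLists l.length := by
  intro l
  induction l with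
  | nil => intro _; simp [pvBitLists]
  | cons a r ih =>
    intro h
    have hr := ih (fun c hc => h c (List.mem_cons_of_mem _ hc))
    have ha := h a List.mem_cons_self
    simp only [List.length_cons, pvBitLists, List.mem_flatMap]
    refine ⟨r, hr, ?_⟩
    simp only [pvIsBit, Bool.or_eq_true, beq_iff_eq] at ha
    rcases ha with rfl | rfl <;> simp

theorem pv_mem_all7 : ∀ l : List Char, (∀ c ∈ l, pvIsBit c = true) → l.length ≤ 7 → l ∈ pvAll7 := by
  intro l h hl
  simp only [pvAll7, List.mem_flatMap, List.mem_range]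
  exact ⟨l.length, by omega, pv_mem_bitLists l h⟩

theorem pv_stepA_skip (p : Int × String) (c : Char) (h : pvIsBit c = false) : pvStepA p c = p := by
  simp only [pvIsBit, Bool.or_eq_false_iff, beq_eq_false_iff_ne] at h
  simp [pvStepA, h.1, h.2]

theorem pv_fold_filter : ∀ (l : List Char) (p : Int × String),
    l.foldl pvStepA p = (l.filter pvIsBit).foldl pvStepA p := by
  intro l
  induction l with
  | nil => intro p; rfl
  | cons a r ih =>
    intro p
    by_cases ha : pvIsBit a = true
    · simp [List.filter_cons, ha, List.foldl_cons, ih]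
    · have := pv_stepA_skip p a (by simp_all)
      simp [List.filter_cons, ha, List.foldl_cons, this, ih]

set_option maxRecDepth 10000 in
theorem pv_names_closed' :
    (pvNames.all fun st => ['0', '1'].all fun c => pvNames.contains (pvδ st c)) = true := by
  decide

theorem pv_names_closed : ∀ st ∈ pvNames, ∀ c : Char, pvIsBit c = true → pvδ st c ∈ pvNames := by
  intro st hst c hc
  simp only [pvIsBit, Bool.or_eq_true, beq_iff_eq] at hc
  have h1 := List.all_eq_true.1 pv_names_closed' st hst
  rcases hc with rfl | rfl
  · exact List.contains_iff_mem.1 (List.all_eq_true.1 h1 '0' (by simp))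
  · exact List.contains_iff_mem.1 (List.all_eq_true.1 h1 '1' (by simp))

theorem pv_stepA_eq : ∀ st ∈ pvNames, ∀ c : Char, pvIsBit c = true → ∀ n : Int,
    pvStepA (n, st) c = (n + (if pvAcc (pvδ st c) then 1 else 0), pvδ st c) := by
  intro st hst c hc n
  simp only [pvIsBit, Bool.or_eq_true, beq_iff_eq] at hc
  fin_cases hst <;> rcases hc with rfl | rfl <;> rfl

-- chunk 3
theorem pv_foldA_cnt : ∀ (l : List Char), (∀ c ∈ l, pvIsBit c = true) →
    ∀ st ∈ pvNames, ∀ n : Int, l.foldl pvStepA (n, st) = (n + pvCnt st l, l.foldl pvδ st) := by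
  intro l
  induction l with
  | nil => intro _ st _ n; simp [pvCnt]
  | cons a r ih =>
    intro h st hst n
    have ha := h a List.mem_cons_self
    rw [List.foldl_cons, pv_stepA_eq st hst a ha n]
    rw [ih (fun c hc => h c (List.mem_cons_of_mem _ hc)) (pvδ st a) (pv_names_closed st hst a ha)]
    simp [pvCnt, List.foldl_cons]
    ring

theorem pv_A_eq_cnt (s : String) :
    fourBitPalindrome s = pvCnt "start" (s.toList.filter pvIsBit) := by
  unfold fourBitPalindrome
  rw [pv_fold_filter]
  rw [pv_foldA_cnt _ (fun c hc => List.of_mem_filter hc) "start" (by simp [pvNames]) 0]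
  simp

theorem pv_cnt_snoc : ∀ (l : List Char) (c : Char) (st : String),
    pvCnt st (l ++ [c]) = pvCnt st l + (if pvAcc ((l ++ [c]).foldl pvδ st) then 1 else 0) := by
  intro l
  induction l with
  | nil => intro c st; simp [pvCnt]
  | cons a r ih =>
    intro c st
    simp only [List.cons_append, pvCnt, List.foldl_cons]
    rw [ih]
    ring

theorem pv_runA_drop7 : ∀ (l : List Char), (∀ c ∈ l, pvIsBit c = true) →
    pvRunA l = pvRunA (l.drop (l.length - 7)) := by
  intro l
  induction l using List.reverseRecOn with
  | nil => intro _; rfl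
  | append_singleton r c ih =>
    intro h
    have hr := fun x hx => h x (List.mem_append_left _ hx)
    have hc := h c (by simp)
    by_cases hlen : r.length ≤ 6
    · have : (r ++ [c]).length - 7 = 0 := by simp; omega
      rw [this, List.drop_zero]
    · -- r.length ≥ 7
      have h7 : 7 ≤ r.length := by omega
      have hw : (r.drop (r.length - 7)).length = 7 := by simp; omega
      -- runA (r ++ [c]) = runA (w ++ [c]) where w = drop (len-7) r
      have step1 : pvRunA (r ++ [c]) = pvRunA (r.drop (r.length - 7) ++ [c]) := by
        simp only [pvRunA, List.foldl_append]
        rw [show r.foldl pvδ "start" = pvRunA r from rfl, ih hr]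
        rfl
      -- w ++ [c] has length 8 and all bits; F1 gives runA = runA of its tail
      have hbits : ∀ x ∈ r.drop (r.length - 7) ++ [c], pvIsBit x = true := by
        intro x hx
        rcases List.mem_append.1 hx with hx | hx
        · exact hr x (List.mem_of_mem_drop hx)
        · simp at hx; subst hx; exact hc
      have hmem : r.drop (r.length - 7) ++ [c] ∈ pvBitLists 8 := by
        have := pv_mem_bitLists _ hbits
        rwa [show (r.drop (r.length - 7) ++ [c]).length = 8 by simp; omega] at this
      have step2 := pvF1 _ hmem
      -- tail (w ++ [c]) = w.tail ++ [c]
      have hwne : r.drop (r.length - 7) ≠ [] := by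
        intro hnil; rw [hnil] at hw; simp at hw
      have htail : (r.drop (r.length - 7) ++ [c]).tail = (r.drop (r.length - 7)).tail ++ [c] := by
        rcases List.exists_cons_of_ne_nil hwne with ⟨y, ys, hys⟩
        rw [hys]; rfl
      -- w.tail = drop (len+1-7) (r ++ [c]) pieces
      have htl : (r.drop (r.length - 7)).tail = r.drop (r.length - 6) := by
        rw [List.tail_drop]; congr 1; omega
      have hfinal : (r ++ [c]).drop ((r ++ [c]).length - 7) = r.drop (r.length - 6) ++ [c] := by
        rw [List.length_append]
        simp only [List.length_cons, List.length_nil]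
        rw [List.drop_append_of_le_length (by omega)]
        have : r.length + 1 - 7 = r.length - 6 := by omega
        rw [this]
      rw [step1, hfinal]
      rw [show pvRunA (r.drop (r.length - 7) ++ [c]) = pvRunA ((r.drop (r.length - 7) ++ [c]).tail) from step2, htail, htl]

theorem pv_pal4_drop (l : List Char) (k : Nat) (h4 : 4 ≤ k) (hk : k ≤ l.length) :
    pvPal4 (l.drop (l.length - k)) = pvPal4 l := by
  unfold pvPal4
  rw [List.length_drop, List.drop_drop]
  congr 2
  omega

theorem pv_KEY : ∀ p : List Char, (∀ c ∈ p, pvIsBit c = true) → pvBad p = false →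
    pvAcc (pvRunA p) = pvPal4 p := by
  intro p hb hbad
  by_cases hl : p.length ≤ 7
  · exact pvF2 p (pv_mem_all7 p hb hl) hbad
  · rw [pv_runA_drop7 p hb]
    have hw : (p.drop (p.length - 7)).length = 7 := by simp; omega
    have hmem : p.drop (p.length - 7) ∈ pvBitLists 7 := by
      have hb' : ∀ c ∈ p.drop (p.length - 7), pvIsBit c = true :=
        fun c hc => hb c (List.mem_of_mem_drop hc)
      have := pv_mem_bitLists _ hb'
      rwa [hw] at this
    rw [pvF4 _ hmem, pv_pal4_drop p 7 (by omega) (by omega)]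

theorem pv_bad_len (p : List Char) (h : pvBad p = true) : p.length = 5 ∨ p.length = 6 := by
  simp only [pvBad, Bool.and_eq_true, Bool.or_eq_true, beq_iff_eq, bne_iff_ne] at h
  rcases h.2 with ⟨h5, _⟩ | ⟨h6, _⟩
  · left; omega
  · right; omega

theorem pv_KEYBAD : ∀ p : List Char, (∀ c ∈ p, pvIsBit c = true) → pvBad p = true →
    pvAcc (pvRunA p) = !(pvPal4 p) := by
  intro p hb hbad
  have := pv_bad_len p hbad
  exact pvF3 p (pv_mem_all7 p hb (by omega)) hbad

-- chunk 4: B side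
theorem pv_win4_eq_zip : ∀ l : List Char,
    pvWin4 l = (l.zip (l.drop 1)).zip ((l.drop 2).zip (l.drop 3)) := by
  intro l
  induction l with
  | nil => rfl
  | cons a rest ih =>
    rcases rest with _ | ⟨b, _ | ⟨c, _ | ⟨d, r⟩⟩⟩ <;> simp [pvWin4] <;> simp [pvWin4] at ih <;>
      simp [ih]

theorem pv_foldB_sum : ∀ (ws : List ((Char × Char) × (Char × Char))) (n : Int),
    ws.foldl (fun count w => if w.1.1 == w.2.2 && w.1.2 == w.2.1 then count + 1 else count) n
      = n + (ws.map pvInc).sum := by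
  intro ws
  induction ws with
  | nil => intro n; simp
  | cons w r ih =>
    intro n
    simp only [List.foldl_cons, List.map_cons, List.sum_cons, ih, pvInc]
    split_ifs <;> ring

theorem pv_B_eq_SB (s : String) :
    fourBitPalindrome_alt s = pvSB (s.toList.filter pvIsBit) := by
  unfold fourBitPalindrome_alt pvSB
  rw [show (fun c => c == '0' || c == '1') = pvIsBit from rfl]
  rw [pv_foldB_sum, pv_win4_eq_zip]
  simp

theorem pv_suf3_snoc (l : List Char) (d : Char) (h : 3 ≤ l.length) :
    (l ++ [d]).drop ((l ++ [d]).length - 4) = l.drop (l.length - 3) ++ [d] := by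
  rw [show (l ++ [d]).length - 4 = l.length - 3 by simp]
  rw [List.drop_append_of_le_length (by omega)]

theorem pv_win4_snoc : ∀ (l : List Char) (d : Char),
    pvWin4 (l ++ [d]) = pvWin4 l ++
      (match l.drop (l.length - 3) with
       | [a, b, c] => [((a, b), (c, d))]
       | _ => []) := by
  intro l
  induction l with
  | nil => intro d; rfl
  | cons a rest ih =>
    intro d
    rcases rest with _ | ⟨b, _ | ⟨c, _ | ⟨e, r⟩⟩⟩
    · rfl
    · rfl
    · rfl
    · rw [show (a :: b :: c :: e :: r) ++ [d] = a :: ((b :: c :: e :: r) ++ [d]) by simp]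
      rw [show pvWin4 (a :: ((b :: c :: e :: r) ++ [d]))
            = ((a, b), (c, e)) :: pvWin4 ((b :: c :: e :: r) ++ [d]) from rfl]
      rw [ih d]
      rw [show pvWin4 (a :: b :: c :: e :: r)
            = ((a, b), (c, e)) :: pvWin4 (b :: c :: e :: r) from rfl]
      have hdrop : (a :: b :: c :: e :: r).drop ((a :: b :: c :: e :: r).length - 3)
          = (b :: c :: e :: r).drop ((b :: c :: e :: r).length - 3) := by
        rw [show (a :: b :: c :: e :: r).length - 3 = ((b :: c :: e :: r).length - 3) + 1 by
              simp]
        rw [List.drop_succ_cons]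
      rw [hdrop]
      simp

theorem pv_SB_snoc (l : List Char) (d : Char) :
    pvSB (l ++ [d]) = pvSB l + (if pvPal4 (l ++ [d]) then 1 else 0) := by
  unfold pvSB
  rw [pv_win4_snoc, List.map_append, List.sum_append]
  by_cases h : 3 ≤ l.length
  · have hlen : (l.drop (l.length - 3)).length = 3 := by simp; omega
    obtain ⟨a, b, c, hsf⟩ := List.length_eq_three.1 hlen
    have hp : pvPal4 (l ++ [d]) = (a == d && b == c) := by
      unfold pvPal4
      rw [pv_suf3_snoc l d h, hsf]
      rfl
    rw [hsf, hp]
    simp only [List.map_cons, List.map_nil, List.sum_cons, List.sum_nil, pvInc]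
    split_ifs <;> simp_all
  · have h0 : (l ++ [d]).length - 4 = 0 := by simp; omega
    have hp : pvPal4 (l ++ [d]) = false := by
      unfold pvPal4
      rw [h0, List.drop_zero]
      rcases l with _ | ⟨a, _ | ⟨b, _ | ⟨c, r⟩⟩⟩ <;> simp_all
    have hm : (match l.drop (l.length - 3) with
               | [a, b, c] => [((a, b), (c, d))] | _ => []) = ([] : List ((Char × Char) × (Char × Char))) := by
      rw [show l.length - 3 = 0 by omega, List.drop_zero]
      rcases l with _ | ⟨a, _ | ⟨b, _ | ⟨c, r⟩⟩⟩ <;> first | rfl | (exfalso; simp at h)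
    rw [hp, hm]
    simp

-- chunk 5
def pvAllGood (l : List Char) : Prop := ∀ i : Nat, pvBad (l.take i) = false

theorem pv_bad_iff (p : List Char) : pvBad p = true ↔
    (p.take 3 = ['0', '0', '1'] ∧
      ((p.length = 5 ∧ p[3]? ≠ p[4]?) ∨ (p.length = 6 ∧ p[3]? = p[4]?))) := by
  simp [pvBad]

theorem pv_allgood_snoc (l : List Char) (c : Char) :
    pvAllGood (l ++ [c]) ↔ pvAllGood l ∧ pvBad (l ++ [c]) = false := by
  constructor
  · intro h
    refine ⟨fun i => ?_, ?_⟩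
    · by_cases hi : i ≤ l.length
      · rw [← List.take_append_of_le_length hi]; exact h i
      · rw [List.take_of_length_le (by omega)]
        have := h l.length
        rwa [List.take_append_of_le_length (le_refl _), List.take_length] at this
    · have := h (l.length + 1)
      rwa [List.take_of_length_le (by simp)] at this
  · rintro ⟨h1, h2⟩ i
    by_cases hi : i ≤ l.length
    · rw [List.take_append_of_le_length hi]; exact h1 i
    · rwa [List.take_of_length_le (by simp; omega)]

theorem pv_no_two_bad (r : List Char) (c : Char) (h : pvBad (r ++ [c]) = true) :
    pvAllGood r := by
  intro i
  by_contra hbad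
  rw [Bool.not_eq_false] at hbad
  rw [pv_bad_iff] at h hbad
  have hlen : (r ++ [c]).length = r.length + 1 := by simp
  have hti : (r.take i).length = min i r.length := by simp
  -- the whole string has length 5 or 6, so r has length 4 or 5
  rcases h.2 with ⟨h5, _⟩ | ⟨h6, hEq⟩
  · -- r.length = 4 : no prefix of r can have length 5 or 6
    rcases hbad.2 with ⟨hl, _⟩ | ⟨hl, _⟩ <;> omega
  · -- r.length = 5 : the only candidate bad prefix of r is r itself (length 5)
    have hr5 : r.length = 5 := by omega
    rcases hbad.2 with ⟨hl, hNe⟩ | ⟨hl, _⟩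
    · have : r.take i = r := List.take_of_length_le (by omega)
      rw [this] at hNe
      have e3 : (r ++ [c])[3]? = r[3]? := List.getElem?_append_left (by omega)
      have e4 : (r ++ [c])[4]? = r[4]? := List.getElem?_append_left (by omega)
      rw [e3, e4] at hEq
      exact hNe hEq
    · omega

theorem pv_MAIN2 : ∀ l : List Char, (∀ x ∈ l, pvIsBit x = true) →
    ((pvAllGood l → pvCnt "start" l = pvSB l) ∧
     (¬ pvAllGood l → pvCnt "start" l - pvSB l = 1 ∨ pvCnt "start" l - pvSB l = -1)) := by
  intro l
  induction l using List.reverseRecOn with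
  | nil =>
    intro _
    constructor
    · intro _; rfl
    · intro hbad
      exact absurd (fun i => by simp [pvBad]) hbad
  | append_singleton r c ih =>
    intro h
    have hr := fun x hx => h x (List.mem_append_left _ hx)
    have hc : pvIsBit c = true := h c (by simp)
    have hbits : ∀ x ∈ r ++ [c], pvIsBit x = true := h
    obtain ⟨ihA, ihB⟩ := ih hr
    have hcnt := pv_cnt_snoc r c "start"
    have hSB := pv_SB_snoc r c
    by_cases hbad : pvBad (r ++ [c]) = true
    · -- the new full prefix is the (unique) bad one
      have hAGr : pvAllGood r := pv_no_two_bad r c hbad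
      have hkey := pv_KEYBAD (r ++ [c]) hbits hbad
      constructor
      · intro hAG
        exact absurd ((pv_allgood_snoc r c).1 hAG).2 (by simp [hbad])
      · intro _
        rw [hcnt, hSB, ihA hAGr]
        rw [show (r ++ [c]).foldl pvδ "start" = pvRunA (r ++ [c]) from rfl] at *
        rw [hkey]
        cases hp : pvPal4 (r ++ [c]) <;> simp [hp] at * <;> omega
    · have hbad' : pvBad (r ++ [c]) = false := by simpa using hbad
      have hkey := pv_KEY (r ++ [c]) hbits hbad'
      constructor
      · intro hAG
        obtain ⟨hAGr, _⟩ := (pv_allgood_snoc r c).1 hAG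
        rw [hcnt, hSB, ihA hAGr]
        rw [show (r ++ [c]).foldl pvδ "start" = pvRunA (r ++ [c]) from rfl, hkey]
      · intro hAG
        have hAGr : ¬ pvAllGood r := by
          intro hAGr
          exact hAG ((pv_allgood_snoc r c).2 ⟨hAGr, hbad'⟩)
        rw [hcnt, hSB]
        rw [show (r ++ [c]).foldl pvδ "start" = pvRunA (r ++ [c]) from rfl, hkey]
        rcases ihB hAGr with h1 | h1 <;> [left; right] <;>
          cases hp : pvPal4 (r ++ [c]) <;> simp [hp] at h1 ⊢ <;> omega

-- chunk 6: D_ ↔ existence of a bad prefix, and the final assembly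
theorem pv_notD_allgood (s : String) (h : ¬ D_fourBitPalindrome s) :
    pvAllGood (s.toList.filter pvIsBit) := by
  intro i
  by_contra hbad
  rw [Bool.not_eq_false, pv_bad_iff] at hbad
  apply h
  unfold D_fourBitPalindrome
  set f := s.toList.filter (fun c => c == '0' || c == '1') with hf
  have hff : s.toList.filter pvIsBit = f := rfl
  rw [hff] at hbad
  have ht3 : (f.take i).take 3 = f.take 3 := by
    rw [List.take_take]
    congr 1
    rcases hbad.2 with ⟨hl, _⟩ | ⟨hl, _⟩ <;> (have : (f.take i).length = min i f.length := by simp) <;> omega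
  refine ⟨by rw [← ht3]; exact hbad.1, ?_⟩
  have hlen : (f.take i).length = min i f.length := by simp
  rcases hbad.2 with ⟨hl, hNe⟩ | ⟨hl, _⟩
  · -- bad prefix of length 5
    by_cases h6 : 6 ≤ f.length
    · left; exact h6
    · right
      have hfl : f.length = 5 := by omega
      have : f.take i = f := List.take_of_length_le (by omega)
      rw [this] at hNe
      exact ⟨hfl, hNe⟩
  · left; omega

theorem pv_D_notallgood (s : String) (h : D_fourBitPalindrome s) :
    ¬ pvAllGood (s.toList.filter pvIsBit) := by
  unfold D_fourBitPalindrome at h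
  set f := s.toList.filter (fun c => c == '0' || c == '1') with hf
  have hff : s.toList.filter pvIsBit = f := rfl
  rw [hff]
  obtain ⟨h3, hrest⟩ := h
  have hfl3 : 3 ≤ f.length := by
    by_contra hlt
    have := congrArg List.length h3
    simp at this
    omega
  rcases hrest with h6 | ⟨h5, hNe⟩
  · by_cases hEq : f[3]? = f[4]?
    · intro hAG
      have hb : pvBad (f.take 6) = true := by
        rw [pv_bad_iff]
        refine ⟨by rw [List.take_take]; exact h3, Or.inr ⟨by simp; omega, ?_⟩⟩
        rw [List.getElem?_take_of_lt (by omega), List.getElem?_take_of_lt (by omega)]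
        exact hEq
      simp [hAG 6] at hb
    · intro hAG
      have hb : pvBad (f.take 5) = true := by
        rw [pv_bad_iff]
        refine ⟨by rw [List.take_take]; exact h3, Or.inl ⟨by simp; omega, ?_⟩⟩
        rw [List.getElem?_take_of_lt (by omega), List.getElem?_take_of_lt (by omega)]
        exact hEq
      simp [hAG 5] at hb
  · intro hAG
    have hb : pvBad (f.take 5) = true := by
      have ht : f.take 5 = f := List.take_of_length_le (by omega)
      rw [pv_bad_iff, ht]
      exact ⟨h3, Or.inl ⟨h5, hNe⟩⟩
    simp [hAG 5] at hb

theorem fourBitPalindrome_spec : Claim_unchanged_fourBitPalindrome := by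
  intro s _
  unfold Spec_fourBitPalindrome
  intro hnD
  rw [pv_A_eq_cnt, pv_B_eq_SB]
  exact (pv_MAIN2 _ (fun x hx => List.of_mem_filter hx)).1 (pv_notD_allgood s hnD)

theorem fourBitPalindrome_tight : Claim_exact_fourBitPalindrome := by
  intro s _ hD hEq
  rw [pv_A_eq_cnt, pv_B_eq_SB] at hEq
  rcases (pv_MAIN2 _ (fun x hx => List.of_mem_filter hx)).2 (pv_D_notallgood s hD) with h | h <;>
    omega

theorem fourBitPalindrome_changed : Claim_changed_fourBitPalindrome := by
  unfold Claim_changed_fourBitPalindrome; decide
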